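-- pv_equiv track=rewrite | github.com/hojihun5516/HSgorithm | Programmers/That song just now/moflow.py | solution
-- ===== SOURCE A (Python) =====
-- def check_shop(melody):
--     if "A#" in melody:
--         melody = melody.replace("A#", "H")
--     if "C#" in melody:
--         melody = melody.replace("C#", "I")
--     if "D#" in melody:
--         melody = melody.replace("D#", "J")
--     if "F#" in melody:
--         melody = melody.replace("F#", "K")
--     if "G#" in melody:
--         melody = melody.replace("G#", "L")
--     return melody
--
-- def during_time(start_time, end_time):
--     start_hour, start_minutes=start_time.split(":")
--     end_hour, end_minutes=end_time.split(":")
--     calc_start = int(start_hour) * 60 + int(start_minutes)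
--     calc_end = int(end_hour) * 60 + int(end_minutes)
--     return calc_end - calc_start
--
-- def solution(m, musicinfos):
--     m = check_shop(m)
--     data = []
--     for mu in musicinfos:
--         temp = {}
--         splited_data = mu.split(",")
--         temp['start_time']=splited_data[0]
--         temp['end_time']=splited_data[1]
--         temp['title']=splited_data[2]
--         temp['melody']=check_shop(splited_data[3])
--         temp['during_time']=during_time(temp['start_time'], temp['end_time'])
--         if temp['during_time'] < len(temp['melody']):
--             temp['melody']=temp['melody'][:temp['during_time']]
--         else:
--             temp['melody']*=(temp['during_time']//len(temp['melody']) + 2)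
--         data.append(temp)
--     answer = []
--     answer.extend(list(filter(lambda x: m in x['melody'], data)))
--
--     if len(answer) == 0:
--         return "(None)"
--     elif len(answer) == 1:
--         return answer[0]['title']
--     during_time_max=max(list(map(lambda x: x['during_time'], answer)))
--
--     return list(filter(lambda x: x['during_time']==during_time_max, answer))[0]['title']
-- ===== SOURCE B (Python) =====
-- def solution(m, musicinfos):
--     def translate(s):
--         return s.replace("A#", "H").replace("C#", "I").replace("D#", "J").replace("F#", "K").replace("G#", "L")
--
--     def minutes(t):
--         h, mn = t.split(":")
--         return int(h) * 60 + int(mn)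
--
--     m = translate(m)
--     best_title = None
--     best_dur = None
--     for info in musicinfos:
--         parts = info.split(",")
--         start, end, title, melody = parts[0], parts[1], parts[2], parts[3]
--         melody = translate(melody)
--         dur = minutes(end) - minutes(start)
--         if dur < len(melody):
--             played = melody[:dur]
--         else:
--             played = melody * (dur // len(melody) + 2)
--         if m in played and (best_dur is None or dur > best_dur):
--             best_title, best_dur = title, dur
--     return "(None)" if best_title is None else best_title
-- ===== Notes on version B (the rewrite author's own statement) =====
-- stated objective: simpler
-- what changed: One pass over musicinfos keeping a running (best_title, best_dur) maximum and a guard-free sharp-translation chain, instead of A's intermediate list of dicts followed by separate filter, max and second-filter passes.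
import Mathlib
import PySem

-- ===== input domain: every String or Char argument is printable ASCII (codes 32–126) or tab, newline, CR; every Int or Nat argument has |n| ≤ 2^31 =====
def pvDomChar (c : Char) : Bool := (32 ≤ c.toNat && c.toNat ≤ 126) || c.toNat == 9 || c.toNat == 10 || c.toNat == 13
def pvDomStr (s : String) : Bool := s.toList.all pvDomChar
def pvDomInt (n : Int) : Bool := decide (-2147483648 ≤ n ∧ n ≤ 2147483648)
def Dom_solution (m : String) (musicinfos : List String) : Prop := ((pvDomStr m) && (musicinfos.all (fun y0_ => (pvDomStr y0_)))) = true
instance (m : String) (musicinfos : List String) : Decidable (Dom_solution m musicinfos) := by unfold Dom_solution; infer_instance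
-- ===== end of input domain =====

-- B fuses A's list-of-dicts + filter + max + second-filter pipeline into one pass with a running best; return value proved equal on Pre_ (inputs where the Python A returns).


-- ===== PORT A =====
structure PvEntry where
  start_time : String
  end_time : String
  title : String
  melody : String
  during : Int
deriving Repr, DecidableEq

-- Python's s * n on strings; exact (n ≤ 0 gives "")
def pyStrMul (s : String) (n : Int) : String := String.ofList ((List.replicate n.toNat s.toList).flatten)

def check_shop (melody : String) : String :=
  let melody := if PySem.Str.isIn "A#" melody then PySem.Str.replace melody "A#" "H" else melody
  let melody := if PySem.Str.isIn "C#" melody then PySem.Str.replace melody "C#" "I" else melody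
  let melody := if PySem.Str.isIn "D#" melody then PySem.Str.replace melody "D#" "J" else melody
  let melody := if PySem.Str.isIn "F#" melody then PySem.Str.replace melody "F#" "K" else melody
  let melody := if PySem.Str.isIn "G#" melody then PySem.Str.replace melody "G#" "L" else melody
  melody

-- none = the Python raised (unpacking ValueError / int() ValueError)
def during_time (start_time end_time : String) : Option Int :=
  match PySem.Str.split? start_time ":" with
  | some [start_hour, start_minutes] =>
    match PySem.Str.split? end_time ":" with
    | some [end_hour, end_minutes] =>
      match PySem.Int.ofStr? start_hour, PySem.Int.ofStr? start_minutes,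
            PySem.Int.ofStr? end_hour, PySem.Int.ofStr? end_minutes with
      | some sh, some sm, some eh, some em => some ((eh * 60 + em) - (sh * 60 + sm))
      | _, _, _, _ => none
    | _ => none
  | _ => none

-- one iteration of A's first loop; none = the Python raised (IndexError / ValueError / ZeroDivisionError)
def entryOf (mu : String) : Option PvEntry :=
  let splited := (PySem.Str.split? mu ",").getD []   -- sep "," ≠ "" so split? is always some
  match PySem.List.pyGet? splited 0, PySem.List.pyGet? splited 1,
        PySem.List.pyGet? splited 2, PySem.List.pyGet? splited 3 with
  | some st, some et, some ti, some mel0 =>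
    let mel := check_shop mel0
    match during_time st et with
    | some dur =>
      if dur < PySem.Str.len mel then
        some ⟨st, et, ti, PySem.Str.slice mel none (some dur), dur⟩
      else if PySem.Str.len mel == 0 then none     -- ZeroDivisionError
      else some ⟨st, et, ti, pyStrMul mel (PySem.Int.floordiv dur (PySem.Str.len mel) + 2), dur⟩
    | none => none
  | _, _, _, _ => none

def stepA (acc : Option (List PvEntry)) (mu : String) : Option (List PvEntry) :=
  match acc with
  | none => none
  | some l =>
    match entryOf mu with
    | none => none
    | some e => some (l ++ [e])

def solution (m : String) (musicinfos : List String) : String :=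
  let m := check_shop m
  match musicinfos.foldl stepA (some []) with
  | none => ""                                     -- unreachable under Pre_: the Python raised
  | some data =>
    let answer := data.filter (fun e => PySem.Str.isIn m e.melody)
    if answer.length == 0 then "(None)"
    else if answer.length == 1 then
      match PySem.List.pyGet? answer 0 with
      | some e => e.title
      | none => ""
    else
      match PySem.List.max? (answer.map (fun e => e.during)) id with
      | some dmax =>
        match PySem.List.pyGet? (answer.filter (fun e => e.during == dmax)) 0 with
        | some e => e.title
        | none => ""
      | none => ""

-- ===== PORT B =====
def translateB (s : String) : String :=
  PySem.Str.replace (PySem.Str.replace (PySem.Str.replace (PySem.Str.replace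
    (PySem.Str.replace s "A#" "H") "C#" "I") "D#" "J") "F#" "K") "G#" "L"

def minutesB (t : String) : Option Int :=
  match PySem.Str.split? t ":" with
  | some [h, mn] =>
    match PySem.Int.ofStr? h, PySem.Int.ofStr? mn with
    | some a, some b => some (a * 60 + b)
    | _, _ => none
  | _ => none

-- parse + build the played melody: (title, played, dur); none = the Python raised
def bodyB (info : String) : Option (String × String × Int) :=
  let parts := (PySem.Str.split? info ",").getD []
  match PySem.List.pyGet? parts 0, PySem.List.pyGet? parts 1,
        PySem.List.pyGet? parts 2, PySem.List.pyGet? parts 3 with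
  | some start, some stop, some title, some mel0 =>
    let melody := translateB mel0
    match minutesB stop, minutesB start with
    | some me, some mst =>
      let dur := me - mst
      if dur < PySem.Str.len melody then some (title, PySem.Str.slice melody none (some dur), dur)
      else if PySem.Str.len melody == 0 then none
      else some (title, pyStrMul melody (PySem.Int.floordiv dur (PySem.Str.len melody) + 2), dur)
    | _, _ => none
  | _, _, _, _ => none

-- `best_dur is None or dur > best_dur` update
def stepBest (best : Option (String × Int)) (cand : String × Int) : Option (String × Int) :=
  match best with
  | none => some cand
  | some b => if b.2 < cand.2 then some cand else some b

def stepLoopB (m : String) (st : Option (Option (String × Int))) (info : String) :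
    Option (Option (String × Int)) :=
  match st with
  | none => none
  | some best =>
    match bodyB info with
    | none => none
    | some (title, played, dur) =>
      some (if PySem.Str.isIn m played then stepBest best (title, dur) else best)

def solution_alt (m : String) (musicinfos : List String) : String :=
  let m := translateB m
  match musicinfos.foldl (stepLoopB m) (some none) with
  | none => ""                                     -- unreachable under Pre_
  | some none => "(None)"
  | some (some (t, _)) => t

-- ===== PRECONDITION & SPEC =====
-- exactly the musicinfos entries the Python accepts: ≥ 4 comma fields, both times "H:M" with
-- int()-parsable pieces, and a melody that is nonempty unless the duration is negative
-- (empty melody with nonnegative duration is a ZeroDivisionError in A).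
def okInfo (mu : String) : Bool :=
  match (PySem.Str.split? mu ",").getD [] with
  | st :: et :: _ :: mel :: _ =>
    (match (PySem.Str.split? st ":").getD [], (PySem.Str.split? et ":").getD [] with
     | [sh, sm], [eh, em] =>
       match PySem.Int.ofStr? sh, PySem.Int.ofStr? sm, PySem.Int.ofStr? eh, PySem.Int.ofStr? em with
       | some a, some b, some c, some d => (mel != "") || decide ((c * 60 + d) - (a * 60 + b) < 0)
       | _, _, _, _ => false
     | _, _ => false)
  | _ => false

def Pre_solution (m : String) (musicinfos : List String) : Prop := musicinfos.all okInfo = true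
instance (m : String) (musicinfos : List String) : Decidable (Pre_solution m musicinfos) := by
  unfold Pre_solution; infer_instance

def pvWitness_solution : String × List String := ("ABC", ["12:00,12:14,HELLO,C#DEFAB"])

def Spec_solution (m : String) (musicinfos : List String) (out : String) : Prop := out = solution_alt m musicinfos
instance (m : String) (musicinfos : List String) (out : String) : Decidable (Spec_solution m musicinfos out) := by unfold Spec_solution; infer_instance

-- ===== CLAIM (what is proved, stated in full; the proofs are below) =====
def Claim_equal_solution : Prop := ∀ (m : String) (musicinfos : List String), Dom_solution m musicinfos → Pre_solution m musicinfos → Spec_solution m musicinfos (solution m musicinfos)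

-- ===== LEMMAS AND PROOFS =====

-- replace is the identity when the pattern does not occur
theorem replace_go_of_not_infix (old new : List Char) (fuel : Nat) :
    ∀ (l acc : List Char), ¬ old <:+: l →
      PySem.Chars.replace.go old new fuel l acc = acc.reverse ++ l := by
  induction fuel with
  | zero => intro l acc _; rfl
  | succ fuel ih =>
    intro l acc h
    cases l with
    | nil => simp [PySem.Chars.replace.go]
    | cons c t =>
      have hpre : old.isPrefixOf (c :: t) = false := by
        by_contra hc
        exact h ((List.isPrefixOf_iff_prefix.mp (by revert hc; cases old.isPrefixOf (c :: t) <;> simp)).isInfix)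
      have ht : ¬ old <:+: t := fun hi => h (List.infix_cons hi)
      simp only [PySem.Chars.replace.go, hpre, Bool.false_eq_true, if_false, ih t (c :: acc) ht,
        List.reverse_cons, List.append_assoc, List.singleton_append]

theorem replace_of_not_isIn (s old new : String) (hold : old.toList ≠ [])
    (h : PySem.Str.isIn old s = false) : PySem.Str.replace s old new = s := by
  have hinf : ¬ old.toList <:+: s.toList :=
    (PySem.Chars.isIn_eq_false_iff _ _).mp (by simpa [PySem.Str.isIn] using h)
  simp only [PySem.Str.replace, PySem.Chars.replace, List.isEmpty_iff, hold, if_false,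
    replace_go_of_not_infix old.toList new.toList s.toList.length s.toList [] hinf,
    List.reverse_nil, List.nil_append, String.ofList_toList]

theorem guard_replace (s old new : String) (hold : old.toList ≠ []) :
    (if PySem.Str.isIn old s then PySem.Str.replace s old new else s) = PySem.Str.replace s old new := by
  cases h : PySem.Str.isIn old s with
  | true => simp
  | false => simp [replace_of_not_isIn s old new hold h]

theorem check_shop_eq (s : String) : check_shop s = translateB s := by
  simp only [check_shop, translateB]
  rw [guard_replace s "A#" "H" (by decide),
     guard_replace (PySem.Str.replace s "A#" "H") "C#" "I" (by decide),
     guard_replace (PySem.Str.replace (PySem.Str.replace s "A#" "H") "C#" "I") "D#" "J" (by decide),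
     guard_replace (PySem.Str.replace (PySem.Str.replace (PySem.Str.replace s "A#" "H") "C#" "I") "D#" "J") "F#" "K" (by decide),
     guard_replace (PySem.Str.replace (PySem.Str.replace (PySem.Str.replace (PySem.Str.replace s "A#" "H") "C#" "I") "D#" "J") "F#" "K") "G#" "L" (by decide)]

theorem during_eq (st et : String) :
    during_time st et =
      match minutesB et, minutesB st with
      | some a, some b => some (a - b)
      | _, _ => none := by
  unfold during_time minutesB
  rcases hs : PySem.Str.split? st ":" with _ | ⟨_ | ⟨sh, _ | ⟨sm, _ | _⟩⟩⟩ <;>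
    rcases he : PySem.Str.split? et ":" with _ | ⟨_ | ⟨eh, _ | ⟨em, _ | _⟩⟩⟩ <;>
      simp <;>
        rcases PySem.Int.ofStr? sh with _ | a <;> rcases PySem.Int.ofStr? sm with _ | b <;>
          try (rcases PySem.Int.ofStr? eh with _ | c <;> rcases PySem.Int.ofStr? em with _ | d) <;>
            simp

theorem body_eq (mu : String) :
    (entryOf mu).map (fun e => (e.title, e.melody, e.during)) = bodyB mu := by
  simp only [entryOf, bodyB]
  rcases h0 : PySem.List.pyGet? ((PySem.Str.split? mu ",").getD []) 0 with _ | st <;>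
    rcases h1 : PySem.List.pyGet? ((PySem.Str.split? mu ",").getD []) 1 with _ | et <;>
      rcases h2 : PySem.List.pyGet? ((PySem.Str.split? mu ",").getD []) 2 with _ | ti <;>
        rcases h3 : PySem.List.pyGet? ((PySem.Str.split? mu ",").getD []) 3 with _ | mel0 <;>
          try rfl
  dsimp only
  rw [during_eq st et, check_shop_eq]
  rcases hme : minutesB et with _ | me <;> rcases hms : minutesB st with _ | mst <;> try rfl
  dsimp only
  split_ifs <;> rfl

theorem foldA_none (infos : List String) : infos.foldl stepA none = none := by
  induction infos with
  | nil => rfl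
  | cons mu rest ih => simpa [stepA] using ih

theorem foldB_none (m : String) (infos : List String) :
    infos.foldl (stepLoopB m) none = none := by
  induction infos with
  | nil => rfl
  | cons mu rest ih => simpa [stepLoopB] using ih

theorem foldA_append (infos : List String) :
    ∀ acc : List PvEntry,
      infos.foldl stepA (some acc) = (infos.foldl stepA (some [])).map (acc ++ ·) := by
  induction infos with
  | nil => intro acc; simp
  | cons mu rest ih =>
    intro acc
    simp only [List.foldl_cons, stepA]
    cases he : entryOf mu with
    | none => simp [foldA_none]
    | some e => rw [ih (acc ++ [e]), ih ([] ++ [e])]; simp [Option.map_map, Function.comp_def]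

def matchList (m : String) (es : List PvEntry) : List (String × Int) :=
  (es.filter (fun e => PySem.Str.isIn m e.melody)).map (fun e => (e.title, e.during))

theorem fold_corresp (m : String) (infos : List String) :
    ∀ best : Option (String × Int),
      infos.foldl (stepLoopB m) (some best) =
        match infos.foldl stepA (some []) with
        | none => none
        | some es => some (List.foldl stepBest best (matchList m es)) := by
  induction infos with
  | nil => intro best; simp [matchList]
  | cons mu rest ih =>
    intro best
    simp only [List.foldl_cons, stepA, stepLoopB]
    cases he : entryOf mu with
    | none =>
      have hb : bodyB mu = none := by rw [← body_eq, he]; rfl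
      simp [hb, foldA_none, foldB_none]
    | some e =>
      have hb : bodyB mu = some (e.title, e.melody, e.during) := by rw [← body_eq, he]; rfl
      rw [hb]
      simp only [List.nil_append]
      rw [ih, foldA_append rest [e]]
      cases hr : rest.foldl stepA (some []) with
      | none => rfl
      | some es =>
        simp only [Option.map_some]
        have : matchList m (e :: es) =
            if PySem.Str.isIn m e.melody then (e.title, e.during) :: matchList m es
            else matchList m es := by
          simp only [matchList, List.filter_cons]
          cases PySem.Str.isIn m e.melody <;> simp
        rw [List.singleton_append, this]
        cases PySem.Str.isIn m e.melody <;> simp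

theorem stepBest_all_le (l : List (String × Int)) :
    ∀ b : String × Int, (∀ x ∈ l, x.2 ≤ b.2) → List.foldl stepBest (some b) l = some b := by
  induction l with
  | nil => intro b _; rfl
  | cons q l ih =>
    intro b h
    have hq : ¬ b.2 < q.2 := not_lt.mpr (h q (by simp))
    simp only [List.foldl_cons, stepBest, hq, if_false]
    exact ih b (fun x hx => h x (by simp [hx]))

theorem stepBest_exists_gt (l : List (String × Int)) :
    ∀ (b x : String × Int), x ∈ l → b.2 < x.2 →
      List.foldl stepBest (some b) l = List.foldl stepBest none l := by
  induction l with
  | nil => intro b x hx; simp at hx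
  | cons q l ih =>
    intro b x hx hbx
    by_cases hb : b.2 < q.2
    · simp [List.foldl_cons, stepBest, hb]
    · have hxl : x ∈ l := by
        rcases List.mem_cons.mp hx with h | h
        · exact absurd (h ▸ hbx) hb
        · exact h
      have hqx : q.2 < x.2 := lt_of_le_of_lt (not_lt.mp hb) hbx
      simp only [List.foldl_cons, stepBest, hb, if_false]
      rw [ih b x hxl hbx, ih q x hxl hqx]

theorem argmax_fold (l : List (String × Int)) (hl : l ≠ []) :
    ∃ p, List.foldl stepBest none l = some p ∧ p ∈ l ∧ (∀ q ∈ l, q.2 ≤ p.2) ∧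
      (l.filter (fun q => q.2 == p.2)).head? = some p := by
  induction l with
  | nil => exact absurd rfl hl
  | cons q l ih =>
    rcases eq_or_ne l [] with rfl | hl'
    · exact ⟨q, rfl, by simp, by simp, by simp⟩
    · obtain ⟨p', hp'fold, hp'mem, hp'max, hp'head⟩ := ih hl'
      by_cases h : p'.2 ≤ q.2
      · refine ⟨q, ?_, by simp, ?_, by simp⟩
        · show List.foldl stepBest (stepBest none q) l = some q
          exact stepBest_all_le l q (fun x hx => le_trans (hp'max x hx) h)
        · intro x hx
          rcases List.mem_cons.mp hx with rfl | hx
          · exact le_refl _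
          · exact le_trans (hp'max x hx) h
      · have hq : q.2 < p'.2 := not_le.mp h
        refine ⟨p', ?_, by simp [hp'mem], ?_, ?_⟩
        · show List.foldl stepBest (stepBest none q) l = some p'
          show List.foldl stepBest (some q) l = some p'
          rw [stepBest_exists_gt l q p' hp'mem hq]; exact hp'fold
        · intro x hx
          rcases List.mem_cons.mp hx with rfl | hx
          · exact le_of_lt hq
          · exact hp'max x hx
        · have hne : (q.2 == p'.2) = false := by simp [ne_of_lt hq]
          simp only [List.filter_cons, hne, Bool.false_eq_true, if_false]
          exact hp'head

theorem pyGet?_zero {α : Type} (l : List α) : PySem.List.pyGet? l 0 = l.head? := by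
  cases l <;> simp [PySem.List.pyGet?, PySem.List.pyIdx?]

theorem finalStage (ms : List PvEntry) :
    (if ms.length == 0 then "(None)"
     else if ms.length == 1 then
       match PySem.List.pyGet? ms 0 with
       | some e => e.title
       | none => ""
     else
       match PySem.List.max? (ms.map (fun e => e.during)) id with
       | some dmax =>
         match PySem.List.pyGet? (ms.filter (fun e => e.during == dmax)) 0 with
         | some e => e.title
         | none => ""
       | none => "") =
    (match List.foldl stepBest none (ms.map (fun e => (e.title, e.during))) with
     | none => "(None)"
     | some p => p.1) := by
  rcases ms with _ | ⟨e1, _ | ⟨e2, rest⟩⟩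
  · rfl
  · simp [stepBest]
  · -- length ≥ 2
    obtain ⟨p, hfold, hmem, hmax, hhead⟩ :=
      argmax_fold ((e1 :: e2 :: rest).map (fun e => (e.title, e.during))) (by simp)
    rw [hfold]
    rw [if_neg (by simp : ¬ ((e1 :: e2 :: rest).length == 0) = true),
        if_neg (by simp : ¬ ((e1 :: e2 :: rest).length == 1) = true)]
    -- the max of the durations is p.2
    obtain ⟨e, heMem, heProj⟩ := List.mem_map.mp hmem
    have hdurs : (e1 :: e2 :: rest).map (fun e => e.during) =
        ((e1 :: e2 :: rest).map (fun e => (e.title, e.during))).map Prod.snd := by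
      simp [List.map_map, Function.comp_def]
    cases hm : PySem.List.max? ((e1 :: e2 :: rest).map (fun e => e.during)) id with
    | none => exact absurd ((PySem.List.max?_eq_none_iff _ _).mp hm) (by simp)
    | some dmax =>
      have hdm_le : dmax ≤ p.2 := by
        have hdmem : dmax ∈ (e1 :: e2 :: rest).map (fun e => e.during) := PySem.List.max?_mem hm
        obtain ⟨e', he'mem, he'd⟩ := List.mem_map.mp hdmem
        have : (e'.title, e'.during) ∈ (e1 :: e2 :: rest).map (fun e => (e.title, e.during)) :=
          List.mem_map.mpr ⟨e', he'mem, rfl⟩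
        simpa [he'd] using hmax _ this
      have hle_dm : p.2 ≤ dmax := by
        have : e.during ≤ dmax := by
          have := PySem.List.max?_isMax hm e.during (List.mem_map.mpr ⟨e, heMem, rfl⟩)
          simpa using this
        calc p.2 = e.during := by rw [← heProj]
          _ ≤ dmax := this
      have hdp : dmax = p.2 := le_antisymm hdm_le hle_dm
      rw [hdp]
      dsimp only
      -- relate the filtered head
      have hcomm : ((e1 :: e2 :: rest).filter (fun e => e.during == p.2)).map
          (fun e => (e.title, e.during)) =
          (((e1 :: e2 :: rest).map (fun e => (e.title, e.during))).filter (fun q => q.2 == p.2)) := by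
        rw [List.filter_map]; rfl
      have hmh := hhead
      rw [← hcomm, List.head?_map] at hmh
      rw [pyGet?_zero]
      cases hh : ((e1 :: e2 :: rest).filter (fun e => e.during == p.2)).head? with
      | none => rw [hh] at hmh; simp at hmh
      | some e' =>
        rw [hh] at hmh
        simp only [Option.map_some] at hmh
        have hte : (e'.title, e'.during) = p := Option.some.inj hmh
        exact congrArg Prod.fst hte

-- ===== VERDICT (by name: the statement is the Claim_ definition above) =====
theorem solution_spec : Claim_equal_solution := by
  intro m musicinfos _ _
  unfold Spec_solution solution solution_alt
  dsimp only
  rw [check_shop_eq, fold_corresp (translateB m) musicinfos none]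
  cases hd : musicinfos.foldl stepA (some []) with
  | none => rfl
  | some es =>
    simp only []
    dsimp only [matchList]
    rw [finalStage (es.filter (fun e => PySem.Str.isIn (translateB m) e.melody))]
    cases List.foldl stepBest none
        ((es.filter (fun e => PySem.Str.isIn (translateB m) e.melody)).map
          (fun e => (e.title, e.during))) with
    | none => rfl
    | some p => obtain ⟨t, d⟩ := p; rfl
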